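-- pv_equiv track=rewrite | github.com/SectumPsempra/ctci | arrays/level_1/check-if-a-key-is-present-in-every-segment-of-size-k-in-an-array.py | check_key_in_segment
-- ===== SOURCE A (Python) =====
-- def check_key_in_segment(arr, x, k):
--     """Check if key x is present in each segment of size k in the array arr.
--     params:
--     -------------------
--     arr - array
--     x - key
--     k - size of segment
--     returns:
--     -------------------
--     bool, "Yes" if True. "No" if False.
--     """
--     n = len(arr)
--     if k==0 or n==0:
--         return "Both the segment size and array size should be greater than 0"
--     if k>n:
--         return f"Wrong Input....segment size is {k} which is more than {n}, the size of the array."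
--     flag = False
--     segment_count = 0
--     for i in range(n):
--         if segment_count==k and flag:
--             segment_count=0
--             flag = False
--         elif segment_count==k and not flag:
--             return "No"
--         if not flag and arr[i]==x:
--             flag=True
--
--         segment_count += 1
--     if segment_count==k and not flag:
--         return "No"
--     return "Yes"
-- ===== SOURCE B (Python) =====
-- def check_key_in_segment(arr, x, k):
--     """Check if key x is present in each segment of size k in the array arr."""
--     n = len(arr)
--     if k == 0 or n == 0:
--         return "Both the segment size and array size should be greater than 0"
--     if k > n:
--         return f"Wrong Input....segment size is {k} which is more than {n}, the size of the array."
--     for start in range(0, (n // k) * k, k):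
--         if x not in arr[start:start + k]:
--             return "No"
--     return "Yes"
-- ===== Notes on version B (the rewrite author's own statement) =====
-- stated objective: simpler
-- what changed: Replaced A's single pass with a running segment counter and a per-segment flag (plus a duplicated post-loop check) by a loop over the full-segment start indices with one slice membership test per segment.
import Mathlib
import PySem

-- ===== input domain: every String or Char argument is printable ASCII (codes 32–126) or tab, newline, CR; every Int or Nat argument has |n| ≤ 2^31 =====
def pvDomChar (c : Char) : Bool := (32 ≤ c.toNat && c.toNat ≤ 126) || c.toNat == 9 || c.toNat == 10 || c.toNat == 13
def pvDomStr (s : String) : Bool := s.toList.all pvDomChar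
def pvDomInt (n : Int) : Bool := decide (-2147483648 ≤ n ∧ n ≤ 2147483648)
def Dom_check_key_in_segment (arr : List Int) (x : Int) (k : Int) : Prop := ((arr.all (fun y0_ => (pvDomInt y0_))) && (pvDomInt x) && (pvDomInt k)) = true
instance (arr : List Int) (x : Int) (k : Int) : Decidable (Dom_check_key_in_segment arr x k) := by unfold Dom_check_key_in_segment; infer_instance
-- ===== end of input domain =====

-- B replaces A's running segment-counter/flag state machine by a loop over the
-- full-segment start indices with one slice membership test per segment (simpler).

-- ===== PORT A =====
-- the for-loop over range(n), with state (flag, segment_count) and two early returns;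
-- the trailing `if segment_count==k and not flag` check is the [] case
def check_key_in_segment_go (x k : Int) : List Int → Bool → Int → String
  | [], flag, sc => if sc == k && !flag then "No" else "Yes"
  | a :: rest, flag, sc =>
    if sc == k && flag then
      -- segment_count = 0; flag = False; then the shared tail of the loop body
      let flag := false
      let sc : Int := 0
      let flag := if !flag && a == x then true else flag
      check_key_in_segment_go x k rest flag (sc + 1)
    else if sc == k && !flag then "No"
    else
      let flag := if !flag && a == x then true else flag
      check_key_in_segment_go x k rest flag (sc + 1)

def check_key_in_segment (arr : List Int) (x : Int) (k : Int) : String :=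
  let n : Int := arr.length
  if k == 0 || n == 0 then
    "Both the segment size and array size should be greater than 0"
  else if k > n then
    "Wrong Input....segment size is " ++ PySem.Int.toStr k ++ " which is more than "
      ++ PySem.Int.toStr n ++ ", the size of the array."
  else
    check_key_in_segment_go x k arr false 0

-- ===== PORT B =====
-- the for-loop over range(0, (n // k) * k, k), returning "No" on the first failing slice
def check_key_in_segment_alt_go (arr : List Int) (x k : Int) : List Int → String
  | [] => "Yes"
  | start :: rest =>
    if !((PySem.List.slice arr (some start) (some (start + k))).contains x) then "No"
    else check_key_in_segment_alt_go arr x k rest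

def check_key_in_segment_alt (arr : List Int) (x : Int) (k : Int) : String :=
  let n : Int := arr.length
  if k == 0 || n == 0 then
    "Both the segment size and array size should be greater than 0"
  else if k > n then
    "Wrong Input....segment size is " ++ PySem.Int.toStr k ++ " which is more than "
      ++ PySem.Int.toStr n ++ ", the size of the array."
  else
    check_key_in_segment_alt_go arr x k
      (PySem.List.pyRange 0 ((PySem.Int.floordiv n k) * k) k)

-- ===== PRECONDITION & SPEC =====
def Spec_check_key_in_segment (arr : List Int) (x : Int) (k : Int) (out : String) : Prop := out = check_key_in_segment_alt arr x k
instance (arr : List Int) (x : Int) (k : Int) (out : String) : Decidable (Spec_check_key_in_segment arr x k out) := by unfold Spec_check_key_in_segment; infer_instance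

-- ===== CLAIM (what is proved, stated in full; the proofs are below) =====
def Claim_equal_check_key_in_segment : Prop := ∀ (arr : List Int) (x : Int) (k : Int), Dom_check_key_in_segment arr x k → Spec_check_key_in_segment arr x k (check_key_in_segment arr x k)

-- ===== LEMMAS AND PROOFS =====

-- common specification: x is present in every full chunk of size K+1
def segSpec (x : Int) (K : Nat) (l : List Int) : String :=
  if h : l.length < K + 1 then "Yes"
  else if x ∈ l.take (K + 1) then segSpec x K (l.drop (K + 1)) else "No"
termination_by l.length
decreasing_by simp; omega

theorem segSpec_small {x : Int} {K : Nat} {l : List Int} (h : l.length < K + 1) :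
    segSpec x K l = "Yes" := by rw [segSpec]; simp [h]

theorem segSpec_step {x : Int} {K : Nat} {l : List Int} (h : ¬ l.length < K + 1) :
    segSpec x K l = if x ∈ l.take (K + 1) then segSpec x K (l.drop (K + 1)) else "No" := by
  rw [segSpec]; simp [h]

-- A returns "Yes" whenever k is negative: segment_count never reaches k
theorem goA_neg (x k : Int) (l : List Int) (b : Bool) (sc : Int)
    (hsc : 0 ≤ sc) (hk : k < 0) : check_key_in_segment_go x k l b sc = "Yes" := by
  induction l generalizing b sc with
  | nil =>
    have h1 : (sc == k) = false := by simp; omega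
    simp [check_key_in_segment_go, h1]
  | cons a rest ih =>
    have h1 : (sc == k) = false := by simp; omega
    simp only [check_key_in_segment_go, h1, Bool.false_and, Bool.false_eq_true, if_false]
    exact ih _ _ (by omega)

-- top-of-loop behaviour when segment_count has reached k
theorem goA_reset (x k : Int) (l : List Int) (b : Bool) (hk : 1 ≤ k) :
    check_key_in_segment_go x k l b k =
      if b then check_key_in_segment_go x k l false 0 else "No" := by
  have h0 : ((0 : Int) == k) = false := by simp; omega
  cases l with
  | nil => cases b <;> simp [check_key_in_segment_go, h0]
  | cons a rest => cases b <;> simp [check_key_in_segment_go, h0]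

-- one segment of A's loop, from an intermediate state (b, sc)
theorem goA_seg (x k : Int) (l : List Int) (b : Bool) (sc : Int)
    (h0 : 0 ≤ sc) (hsk : sc < k) :
    check_key_in_segment_go x k l b sc =
      if (l.length : Int) < k - sc then "Yes"
      else if b || decide (x ∈ l.take (k - sc).toNat) then
        check_key_in_segment_go x k (l.drop (k - sc).toNat) false 0
      else "No" := by
  induction l generalizing b sc with
  | nil =>
    have h1 : (sc == k) = false := by simp; omega
    have hL : ((([] : List Int).length : Int) < k - sc) := by simp; omega
    rw [if_pos hL]
    simp only [check_key_in_segment_go, h1, Bool.false_and, Bool.false_eq_true, if_false]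
  | cons a rest ih =>
    have h1 : (sc == k) = false := by simp; omega
    have hax : (a == x) = decide (x = a) := by
      rw [show (a == x) = decide (a = x) from rfl, decide_eq_decide]
      exact eq_comm
    have hf : (if !b && a == x then true else b) = (b || decide (x = a)) := by
      cases b <;> simp [hax]
    simp only [check_key_in_segment_go, h1, Bool.false_and, Bool.false_eq_true, if_false, hf]
    by_cases h2 : sc + 1 < k
    · rw [ih (b || decide (x = a)) (sc + 1) (by omega) h2]
      have ht : (k - sc).toNat = (k - (sc + 1)).toNat + 1 := by omega
      rw [ht]
      by_cases hL : (rest.length : Int) < k - (sc + 1)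
      · have hL' : (((a :: rest).length : Int) < k - sc) := by
          simp only [List.length_cons]; push_cast; omega
        rw [if_pos hL, if_pos hL']
      · have hL' : ¬ (((a :: rest).length : Int) < k - sc) := by
          simp only [List.length_cons]; push_cast; omega
        rw [if_neg hL, if_neg hL']
        simp only [List.take_succ_cons, List.drop_succ_cons, List.mem_cons]
        have hmem : (b || decide (x = a) || decide (x ∈ rest.take (k - (sc + 1)).toNat)) =
            (b || decide (x = a ∨ x ∈ rest.take (k - (sc + 1)).toNat)) := by
          cases b <;> simp
        rw [hmem]
    · have hk1 : sc + 1 = k := by omega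
      rw [hk1, goA_reset x k rest _ (by omega)]
      have h3 : (k - sc).toNat = 1 := by omega
      have h4 : ¬ (((a :: rest).length : Int) < k - sc) := by
        simp only [List.length_cons]; push_cast; omega
      rw [if_neg h4, h3]
      simp only [List.take_succ_cons, List.take_zero, List.drop_succ_cons, List.drop_zero,
        List.mem_singleton]

-- A's main loop equals segSpec
theorem goA_spec (x k : Int) (hk : 1 ≤ k) : ∀ (n : Nat) (l : List Int), l.length = n →
    check_key_in_segment_go x k l false 0 = segSpec x (k.toNat - 1) l := by
  intro n
  induction n using Nat.strong_induction_on with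
  | _ n ih =>
    intro l hl
    rw [goA_seg x k l false 0 le_rfl (by omega)]
    have hK1 : k.toNat - 1 + 1 = k.toNat := by omega
    by_cases hsmall : (l.length : Int) < k - 0
    · rw [if_pos hsmall, segSpec_small (by omega)]
    · rw [if_neg hsmall, segSpec_step (by omega), hK1]
      have htn : (k - 0).toNat = k.toNat := by omega
      rw [htn]
      simp only [Bool.false_or, decide_eq_true_eq]
      by_cases hm : x ∈ l.take k.toNat
      · rw [if_pos hm, if_pos hm]
        exact ih (l.drop k.toNat).length (by simp; omega) _ rfl
      · rw [if_neg hm, if_neg hm]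

-- B's loop over the chunk starts equals segSpec
theorem goB_spec (x : Int) (K : Nat) (arr : List Int) (hK : 1 ≤ K) :
    ∀ (c j : Nat), j + c = arr.length / K →
    check_key_in_segment_alt_go arr x (K : Int)
        ((List.range' j c).map (fun (t : Nat) => ((K : Int) * (t : Int)))) =
      segSpec x (K - 1) (arr.drop (j * K)) := by
  intro c
  induction c with
  | zero =>
    intro j hj
    simp only [List.range'_zero, List.map_nil, check_key_in_segment_alt_go]
    have hq1 : arr.length / K * K ≤ arr.length := Nat.div_mul_le_self _ _
    have hq2 := Nat.div_add_mod arr.length K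
    have hq3 := Nat.mod_lt arr.length (show 0 < K by omega)
    have hmul : K * (arr.length / K) = (arr.length / K) * K := Nat.mul_comm _ _
    have hlen : (arr.drop (j * K)).length < (K - 1) + 1 := by
      have hj' : j = arr.length / K := by omega
      subst hj'
      simp only [List.length_drop]
      omega
    rw [segSpec_small hlen]
  | succ c ihc =>
    intro j hj
    have hjK : (j + 1) * K ≤ arr.length := by
      calc (j + 1) * K ≤ (arr.length / K) * K := Nat.mul_le_mul_right K (by omega)
        _ ≤ arr.length := Nat.div_mul_le_self _ _
    have hsm : j * K + K = (j + 1) * K := (Nat.succ_mul j K).symm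
    rw [List.range'_succ]
    simp only [List.map_cons, check_key_in_segment_alt_go]
    have hs : PySem.List.slice arr (some ((K : Int) * (j : Int)))
        (some ((K : Int) * (j : Int) + (K : Int))) = (arr.drop (j * K)).take K := by
      have h1 : ((K : Int) * (j : Int)) = ((j * K : Nat) : Int) := by push_cast; ring
      have h2 : ((K : Int) * (j : Int) + (K : Int)) = (((j + 1) * K : Nat) : Int) := by
        push_cast; ring
      rw [h2, h1, PySem.List.slice_natCast]
      congr 1
      omega
    rw [hs]
    have hbig : ¬ (arr.drop (j * K)).length < (K - 1) + 1 := by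
      simp only [List.length_drop]; omega
    rw [segSpec_step hbig]
    have hKK : (K - 1) + 1 = K := by omega
    rw [hKK]
    by_cases hm : x ∈ (arr.drop (j * K)).take K
    · have hcont : ((arr.drop (j * K)).take K).contains x = true := by
        simp [List.contains_eq_mem, hm]
      rw [if_pos hm]
      simp only [hcont, Bool.not_true, Bool.false_eq_true, if_false]
      rw [ihc (j + 1) (by omega)]
      congr 1
      rw [List.drop_drop]
      congr 1
      omega
    · have hcont : ((arr.drop (j * K)).take K).contains x = false := by
        simp [List.contains_eq_mem, hm]
      rw [if_neg hm, hcont]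
      simp

-- range(0, (n//k)*k, k) for positive k, as chunk starts
theorem pyRange_chunks (k M : Int) (hk : 1 ≤ k) (hM : 0 ≤ M) :
    PySem.List.pyRange 0 (M * k) k = (List.range' 0 M.toNat).map (fun (t : Nat) => (k * (t : Int))) := by
  rw [PySem.List.pyRange_of_pos 0 (M * k) (by omega)]
  have hcount : (if (0 : Int) < M * k then ((M * k - 0 + k - 1) / k).toNat else 0) = M.toNat := by
    by_cases h : (0 : Int) < M * k
    · rw [if_pos h]
      have he : (M * k - 0 + k - 1) = (k - 1) + M * k := by ring
      rw [he, Int.add_mul_ediv_right _ _ (by omega),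
        Int.ediv_eq_zero_of_lt (by omega) (by omega)]
      simp
    · rw [if_neg h]
      have hM0 : M = 0 := by
        by_contra hne
        have h1 : (1 : Int) ≤ M := by omega
        have h2 : 1 * k ≤ M * k := mul_le_mul_of_nonneg_right h1 (by omega)
        omega
      simp [hM0]
  rw [hcount, List.range_eq_range']
  simp

-- range(0, (n//k)*k, k) is empty for negative k (n ≥ 1)
theorem pyRange_neg_empty (n k : Int) (hn : 1 ≤ n) (hk : k < 0) :
    PySem.List.pyRange 0 (PySem.Int.floordiv n k * k) k = [] := by
  have hmod : PySem.Int.mod n k ≤ 0 := by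
    have h1 := PySem.Int.mod_neg_neg (-n) (-k)
    have h2 : PySem.Int.mod (-n) (-k) = (-n) % (-k) :=
      PySem.Int.mod_eq_emod_of_pos (by omega)
    have h3 : 0 ≤ (-n) % (-k) := Int.emod_nonneg _ (by omega)
    simp only [neg_neg] at h1
    omega
  have hge : 1 ≤ PySem.Int.floordiv n k * k := by
    have := PySem.Int.floordiv_mul_add_mod n k
    omega
  have h2 : ¬ (0 : Int) < k := by omega
  have h3 : ¬ (PySem.Int.floordiv n k * k < 0) := by omega
  simp [PySem.List.pyRange, show ¬ k = 0 by omega, h2, h3]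

-- ===== VERDICT (by name: the statement is the Claim_ definition above) =====
theorem check_key_in_segment_spec : Claim_equal_check_key_in_segment := by
  unfold Claim_equal_check_key_in_segment Spec_check_key_in_segment
  intro arr x k _
  simp only [check_key_in_segment, check_key_in_segment_alt]
  by_cases h0 : (k == 0 || ((arr.length : Int) == 0)) = true
  · rw [if_pos h0, if_pos h0]
  · rw [if_neg h0, if_neg h0]
    simp only [Bool.or_eq_true, beq_iff_eq, not_or] at h0
    by_cases h2 : k > (arr.length : Int)
    · rw [if_pos h2, if_pos h2]
    · rw [if_neg h2, if_neg h2]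
      by_cases hk : 1 ≤ k
      · -- positive k: both sides equal segSpec
        have hkk : ((k.toNat : Nat) : Int) = k := Int.toNat_of_nonneg (by omega)
        have hfd : PySem.Int.floordiv (arr.length : Int) k =
            ((arr.length / k.toNat : Nat) : Int) := by
          rw [← hkk]; exact PySem.Int.floordiv_natCast arr.length k.toNat
        rw [goA_spec x k hk arr.length arr rfl, hfd,
          pyRange_chunks k _ hk (by positivity)]
        rw [← hkk]
        have := goB_spec x k.toNat arr (by omega) (arr.length / k.toNat) 0 (by omega)
        simp only [Nat.zero_mul, List.drop_zero] at this
        rw [Int.toNat_natCast]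
        exact this.symm
      · -- negative k: A stays "Yes", B's range is empty
        have hn1 : (1 : Int) ≤ (arr.length : Int) := by
          rcases h0 with ⟨_, hn⟩; omega
        rw [goA_neg x k arr false 0 le_rfl (by omega),
          pyRange_neg_empty (arr.length : Int) k hn1 (by omega)]
        rfl
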